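-- pv_equiv track=rewrite | github.com/Pharallaxe/algorithms | ascii/montagne/montagne.py | montagne
-- ===== SOURCE A (Python) =====
-- def montagne(sommets):
--     paysage = []
--     max_el = max(sommets)
--
--     for j in range(max_el + 1):
--         ligne = ""
--
--         for el in sommets:
--             if el < j + 1:
--                 ligne += " " * (2 * el)
--             else:
--                 ligne += " " * j + "/" + " " * (2
--                 * (el - j - 1)) + "\\" + " " * j
--         paysage.append(ligne.rstrip())
--
--     return "\n".join(reversed(paysage))
-- ===== SOURCE B (Python) =====
-- def montagne(sommets):
--     max_el = max(sommets)
--     width = 2 * sum(el for el in sommets if el > 0)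
--     grid = [bytearray(b" " * width) for _ in range(max_el + 1)]
--     off = 0
--     for el in sommets:
--         if el > 0:
--             for j in range(el):
--                 grid[j][off + j] = 0x2F       # '/'
--                 grid[j][off + 2 * el - 1 - j] = 0x5C  # '\'
--             off += 2 * el
--     return "\n".join(row.decode("ascii").rstrip() for row in reversed(grid))
-- ===== Notes on version B (the rewrite author's own statement) =====
-- stated objective: alternative
-- what changed: B renders into a 2D character grid, placing one '/' and one '\' per level of each mountain at a running column offset, instead of A's row-by-row string concatenation scanning every mountain on every row.
import Mathlib
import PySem

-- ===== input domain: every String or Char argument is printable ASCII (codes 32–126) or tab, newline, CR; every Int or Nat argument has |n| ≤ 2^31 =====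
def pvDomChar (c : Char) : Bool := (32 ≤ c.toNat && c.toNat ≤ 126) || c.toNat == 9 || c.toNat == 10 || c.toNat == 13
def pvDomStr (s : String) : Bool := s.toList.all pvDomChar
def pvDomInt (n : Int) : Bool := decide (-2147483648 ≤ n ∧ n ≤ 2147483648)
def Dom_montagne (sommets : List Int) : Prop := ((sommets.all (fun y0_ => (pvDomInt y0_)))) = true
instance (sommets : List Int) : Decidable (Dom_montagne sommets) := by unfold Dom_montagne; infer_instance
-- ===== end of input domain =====

-- B renders the landscape into a 2D character grid (one '/' and one '\' placed per level of
-- each mountain at a running column offset) instead of A's row-by-row string concatenation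
-- over all mountains; same output, same asymptotic cost ("alternative").

-- ===== PORT A =====
-- " " * n : Python string repetition (empty for n ≤ 0) — exact via PySem.List.pyRepeat
def pySpaces (n : Int) : String := String.ofList (PySem.List.pyRepeat [' '] n)

def montagne (sommets : List Int) : String :=
  -- max(sommets): ValueError on [] is excluded by Pre_montagne; getD 0 is never reached there
  let max_el := (PySem.List.max? sommets (fun x => x)).getD 0
  let paysage := (PySem.List.pyRange 0 (max_el + 1)).foldl (fun paysage j =>
    let ligne := sommets.foldl (fun ligne el =>
      if el < j + 1 then ligne ++ pySpaces (2 * el)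
      else ligne ++ (pySpaces j ++ "/" ++ pySpaces (2 * (el - j - 1)) ++ "\\" ++ pySpaces j)) ""
    paysage ++ [PySem.Str.rstrip ligne]) []
  PySem.Str.join "\n" paysage.reverse

-- ===== PORT B =====
-- one mountain of height e at column offset off: for j in range(e), set '/' and '\' in row j
def placeB (g : List (List Char)) (off e : Nat) : List (List Char) :=
  (List.range e).foldl (fun g j =>
    g.modify j (fun row => (row.set (off + j) '/').set (off + 2 * e - 1 - j) '\\')) g

def montagne_alt (sommets : List Int) : String :=
  let max_el := (PySem.List.max? sommets (fun x => x)).getD 0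
  let width := (2 * sommets.foldl (fun s el => if 0 < el then s + el else s) 0).toNat
  let grid0 : List (List Char) := List.replicate (max_el + 1).toNat (List.replicate width ' ')
  let st := sommets.foldl (fun (st : List (List Char) × Nat) el =>
      if 0 < el then (placeB st.1 st.2 el.toNat, st.2 + 2 * el.toNat) else st) (grid0, 0)
  PySem.Str.join "\n" (st.1.reverse.map (fun row => PySem.Str.rstrip (String.ofList row)))

-- ===== PRECONDITION & SPEC =====
-- Pre_ excludes only the empty list, on which A's max(sommets) raises ValueError.
def Pre_montagne (sommets : List Int) : Prop := sommets ≠ []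
instance (sommets : List Int) : Decidable (Pre_montagne sommets) := by unfold Pre_montagne; infer_instance
def pvWitness_montagne : List Int := [3, 0, 2, 1]

def Spec_montagne (sommets : List Int) (out : String) : Prop := out = montagne_alt sommets
instance (sommets : List Int) (out : String) : Decidable (Spec_montagne sommets out) := by unfold Spec_montagne; infer_instance

-- ===== CLAIM (what is proved, stated in full; the proofs are below) =====
def Claim_equal_montagne : Prop := ∀ (sommets : List Int), Dom_montagne sommets → Pre_montagne sommets → Spec_montagne sommets (montagne sommets)

-- ===== LEMMAS AND PROOFS =====

def fragL (j : Nat) (el : Int) : List Char :=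
  if el < (j : Int) + 1 then List.replicate (2 * el).toNat ' '
  else List.replicate j ' ' ++ '/' :: (List.replicate (2 * (el - (j : Int) - 1)).toNat ' ' ++ '\\' :: List.replicate j ' ')
def posW : List Int → Nat
  | [] => 0
  | el :: t => (2 * el).toNat + posW t
lemma length_fragL (j : Nat) (el : Int) : (fragL j el).length = (2 * el).toNat := by
  unfold fragL; split_ifs with h <;> simp <;> omega

lemma toList_pySpaces (n : Int) : (pySpaces n).toList = List.replicate n.toNat ' ' := by
  simp [pySpaces, PySem.List.pyRepeat_singleton]

lemma lineA_toList (j : Nat) (l : List Int) : ∀ (s : String),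
    (l.foldl (fun ligne el =>
      if el < (j : Int) + 1 then ligne ++ pySpaces (2 * el)
      else ligne ++ (pySpaces (j : Int) ++ "/" ++ pySpaces (2 * (el - (j : Int) - 1)) ++ "\\" ++ pySpaces (j : Int))) s).toList
    = s.toList ++ l.flatMap (fragL j) := by
  induction l with
  | nil => intro s; simp
  | cons el t ih =>
    intro s
    simp only [List.foldl_cons, List.flatMap_cons]
    rw [ih]
    unfold fragL
    split_ifs with h <;>
      simp [String.toList_append, toList_pySpaces, List.append_assoc]

lemma foldl_range_modify_getElem? {α : Type} (f : Nat → α → α) (n j : Nat) (g : List α) :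
    (((List.range n).foldl (fun g i => g.modify i (f i)) g))[j]? =
      if j < n then (g[j]?).map (f j) else g[j]? := by
  induction n with
  | zero => simp
  | succ n ih =>
    rw [List.range_succ, List.foldl_append]
    simp only [List.foldl_cons, List.foldl_nil]
    rw [List.getElem?_modify, ih]
    rcases Nat.lt_trichotomy j n with h | h | h
    · simp [Nat.lt_succ_of_lt h, h, Nat.ne_of_gt h]
    · subst h; simp [Nat.lt_irrefl, Nat.lt_succ_self, Option.map]
    · have h1 : ¬ j < n := by omega
      have h2 : ¬ j < n + 1 := by omega
      simp [h1, h2, Nat.ne_of_lt h]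

lemma length_foldl_range_modify {α : Type} (f : Nat → α → α) (n : Nat) (g : List α) :
    (((List.range n).foldl (fun g i => g.modify i (f i)) g)).length = g.length := by
  induction n with
  | zero => simp
  | succ n ih =>
    rw [List.range_succ, List.foldl_append]
    simp [ih]

lemma posW_eq (l : List Int) : ∀ s : Int, 0 ≤ s →
    (2 * l.foldl (fun s el => if 0 < el then s + el else s) s).toNat = (2 * s).toNat + posW l := by
  induction l with
  | nil => intro s hs; simp [posW]
  | cons el t ih =>
    intro s hs
    simp only [List.foldl_cons, posW]
    split_ifs with h
    · rw [ih (s + el) (by omega)]; omega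
    · rw [ih s hs]; omega

lemma set_replicate_space (n i : Nat) (h : i < n) (c : Char) :
    (List.replicate n ' ').set i c = List.replicate i ' ' ++ c :: List.replicate (n - i - 1) ' ' := by
  apply List.ext_getElem?
  intro k
  rw [List.getElem?_set]
  rcases Nat.lt_trichotomy k i with hk | hk | hk
  · simp [Nat.ne_of_gt hk, List.getElem?_append, hk, Nat.lt_of_lt_of_le hk (le_of_lt h)]
  · subst hk
    simp [h, List.getElem?_append, List.getElem?_replicate]
  · have : ¬ i = k := by omega
    simp only [this, if_false]
    by_cases hkn : k < n
    · rw [List.getElem?_replicate, if_pos hkn]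
      rw [List.getElem?_append_right (by simp; omega)]
      simp only [List.length_replicate]
      have hki : k - i = (k - i - 1) + 1 := by omega
      rw [hki, List.getElem?_cons_succ, List.getElem?_replicate, if_pos (by omega)]
    · rw [List.getElem?_eq_none (by simp; omega), List.getElem?_eq_none (by simp; omega)]

lemma set_row (p : List Char) (off W j : Nat) (el : Int) (hp : p.length = off)
    (hel : 0 < el) (hj : j < el.toNat) :
    ((p ++ List.replicate (2 * el.toNat + W) ' ').set (off + j) '/').set
        (off + 2 * el.toNat - 1 - j) '\\'
      = p ++ fragL j el ++ List.replicate W ' ' := by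
  set e := el.toNat with he
  have h1 : (p ++ List.replicate (2 * e + W) ' ').set (off + j) '/'
      = p ++ (List.replicate j ' ' ++ '/' :: List.replicate (2 * e + W - j - 1) ' ') := by
    rw [List.set_append_right _ _ (by omega)]
    rw [hp, Nat.add_sub_cancel_left]
    rw [set_replicate_space _ _ (by omega)]
  rw [h1]
  have h2 : p ++ (List.replicate j ' ' ++ '/' :: List.replicate (2 * e + W - j - 1) ' ')
      = (p ++ List.replicate j ' ' ++ ['/']) ++ List.replicate (2 * e + W - j - 1) ' ' := by
    simp [List.append_assoc]
  have hlen : (p ++ List.replicate j ' ' ++ ['/']).length = off + j + 1 := by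
    simp [hp]; omega
  rw [h2, List.set_append_right _ _ (by rw [hlen]; omega)]
  rw [hlen]
  have hidx : off + 2 * e - 1 - j - (off + j + 1) = 2 * e - 2 * j - 2 := by omega
  rw [hidx, set_replicate_space _ _ (by omega)]
  have hfrag : fragL j el = List.replicate j ' ' ++ '/' :: (List.replicate (2 * e - 2 * j - 2) ' ' ++ '\\' :: List.replicate j ' ') := by
    unfold fragL
    rw [if_neg (by omega)]
    have h3 : (2 * (el - (j : Int) - 1)).toNat = 2 * e - 2 * j - 2 := by omega
    rw [h3]
  rw [hfrag]
  have hrest : 2 * e + W - j - 1 - (2 * e - 2 * j - 2) - 1 = j + W := by omega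
  rw [hrest, List.replicate_add]
  simp [List.append_assoc]

lemma placeB_getElem? (g : List (List Char)) (off e j : Nat) :
    (placeB g off e)[j]? = if j < e then
      (g[j]?).map (fun row => (row.set (off + j) '/').set (off + 2 * e - 1 - j) '\\')
    else g[j]? := by
  unfold placeB
  exact foldl_range_modify_getElem? (fun j row => (row.set (off + j) '/').set (off + 2 * e - 1 - j) '\\') e j g

lemma placeB_length (g : List (List Char)) (off e : Nat) : (placeB g off e).length = g.length := by
  unfold placeB
  exact length_foldl_range_modify _ e g

lemma build_inv (l : List Int) : ∀ (g : List (List Char)) (off : Nat) (p : Nat → List Char),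
    (∀ el ∈ l, el.toNat ≤ g.length) →
    (∀ j, j < g.length → g[j]? = some (p j ++ List.replicate (posW l) ' ') ∧ (p j).length = off) →
    (l.foldl (fun st el => if 0 < el then (placeB st.1 st.2 el.toNat, st.2 + 2 * el.toNat) else st)
        (g, off)).1.length = g.length ∧
    ∀ j, j < g.length →
      (l.foldl (fun st el => if 0 < el then (placeB st.1 st.2 el.toNat, st.2 + 2 * el.toNat) else st)
        (g, off)).1[j]? = some (p j ++ l.flatMap (fragL j)) := by
  induction l with
  | nil =>
    intro g off p _ hrow
    refine ⟨rfl, fun j hj => ?_⟩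
    simpa [posW] using (hrow j hj).1
  | cons el t ih =>
    intro g off p hb hrow
    simp only [List.foldl_cons, List.flatMap_cons]
    by_cases hel : 0 < el
    · rw [if_pos hel]
      have hlen : (placeB g off el.toNat).length = g.length := placeB_length g off el.toNat
      have hposW : posW (el :: t) = 2 * el.toNat + posW t := by simp only [posW]; omega
      obtain ⟨L, R⟩ := ih (placeB g off el.toNat) (off + 2 * el.toNat) (fun j => p j ++ fragL j el)
        (fun el2 h => hlen ▸ hb el2 (List.mem_cons_of_mem _ h))
        (by
          intro j hj
          rw [hlen] at hj
          obtain ⟨hg, hplen⟩ := hrow j hj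
          rw [hposW] at hg
          refine ⟨?_, by simp only [List.length_append, length_fragL, hplen]; omega⟩
          rw [placeB_getElem?, hg]
          by_cases hje : j < el.toNat
          · rw [if_pos hje]
            simp only [Option.map_some]
            rw [set_row (p j) off (posW t) j el hplen hel hje]
          · rw [if_neg hje]
            have hfr : fragL j el = List.replicate (2 * el.toNat) ' ' := by
              unfold fragL
              rw [if_pos (by omega)]
              congr 1
              omega
            simp only [hfr, List.replicate_add, List.append_assoc])
      refine ⟨by rw [L, hlen], fun j hj => ?_⟩
      rw [R j (by rw [hlen]; exact hj)]
      simp [List.append_assoc]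
    · rw [if_neg hel]
      have hposW : posW (el :: t) = posW t := by simp only [posW]; omega
      obtain ⟨L, R⟩ := ih g off p (fun el2 h => hb el2 (List.mem_cons_of_mem _ h))
        (fun j hj => by rw [← hposW]; exact hrow j hj)
      refine ⟨L, fun j hj => ?_⟩
      rw [R j hj]
      have hfr : fragL j el = [] := by
        unfold fragL
        rw [if_pos (by omega)]
        simp
        omega
      rw [hfr]
      simp

-- ===== VERDICT (by name: the statement is the Claim_ definition above) =====
theorem montagne_spec : Claim_equal_montagne := by
  intro sommets _ hne
  unfold Spec_montagne
  unfold Pre_montagne at hne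

  obtain ⟨m, hm⟩ : ∃ m, PySem.List.max? sommets (fun x => x) = some m := by
    cases h : PySem.List.max? sommets (fun x => x) with
    | none => exact absurd ((PySem.List.max?_eq_none_iff _ _).mp h) hne
    | some m => exact ⟨m, rfl⟩
  have hmax : ∀ y ∈ sommets, y ≤ m := PySem.List.max?_isMax hm
  set R := (m + 1).toNat with hR
  have hwidth : (2 * sommets.foldl (fun s el => if 0 < el then s + el else s) 0).toNat = posW sommets := by
    simpa using posW_eq sommets 0 le_rfl
  have hinv := build_inv sommets
      (List.replicate R (List.replicate (posW sommets) ' ')) 0 (fun _ => [])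
      (by intro el h; simp only [List.length_replicate]; have := hmax el h; omega)
      (by intro j hj
          simp only [List.length_replicate] at hj
          exact ⟨by rw [List.getElem?_replicate, if_pos hj]; simp, rfl⟩)
  simp only [List.length_replicate] at hinv
  obtain ⟨hL, hrows⟩ := hinv
  unfold montagne montagne_alt
  rw [hm]
  simp only [Option.getD_some, hwidth]
  rw [PySem.List.foldl_append_singleton_eq_map]
  have hrange : PySem.List.pyRange 0 (m + 1) = (List.range R).map (fun k : Nat => (k : Int)) := by
    rcases (by omega : m + 1 ≤ 0 ∨ 0 < m + 1) with h | h
    · rw [PySem.List.pyRange_one_eq_nil h]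
      have hz : R = 0 := by omega
      rw [hz]
      simp
    · have hc : ((R : Int)) = m + 1 := by omega
      rw [← hc, PySem.List.pyRange_zero_natCast]
  rw [hrange, List.nil_append]
  refine congrArg (PySem.Str.join "\n") ?_
  rw [List.map_reverse]
  refine congrArg List.reverse ?_
  apply List.ext_getElem?
  intro k
  simp only [List.getElem?_map]
  by_cases hk : k < R
  · rw [List.getElem?_range hk, hrows k hk]
    simp only [Option.map_some, List.nil_append]
    congr 1
    apply String.toList_inj.mp
    rw [PySem.Str.toList_rstrip, PySem.Str.toList_rstrip]
    congr 1
    rw [lineA_toList k sommets ""]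
    simp
  · rw [List.getElem?_eq_none (by simpa using hk), List.getElem?_eq_none (by rw [hL]; omega)]
    simp
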